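-- pv_equiv track=rewrite | github.com/HArnarsson/project_euler_solutions | solutions/001-100/011-020/peuler019.py | create_calendar_year
-- ===== SOURCE A (Python) =====
-- days = ['sun','mon','tue','wed','thu','fri','sat']
--
-- months = [31,28,31,30,31,30,31,31,30,31,30,31]
--
-- months_leap_year = [31,29,31,30,31,30,31,31,30,31,30,31]
--
-- def is_leap_year(year):
--     if year%100 == 0 and year%400 != 0:
--         return False
--     elif year%100 == 0 and year%400 == 0:
--         return True
--     elif year%4==0:
--         return True
--     else:
--         return False
--
-- def create_calendar_year(year,first_weekday):
--     weekday_list = []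
--     weekday_by_month =[[],[],[],[],[],[],[],[],[],[],[],[]]
--     start_index = days.index(first_weekday)
--     counter = 0
--     if is_leap_year(year):
--         for i in range(366):
--             weekday_list.append(days[(start_index+i)%7])
--         for i in range(len(months_leap_year)):
--             for j in range(months_leap_year[i]):
--                 weekday_by_month[i].append(weekday_list[counter + j])
--             counter += months[i]
--         return weekday_by_month
--     else:
--         for i in range(365):
--             weekday_list.append(days[(start_index+i)%7])
--         for i in range(len(months)):
--             for j in range(months[i]):
--                 weekday_by_month[i].append(weekday_list[counter + j])
--             counter += months[i]
--         return weekday_by_month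
-- ===== SOURCE B (Python) =====
-- days = ['sun','mon','tue','wed','thu','fri','sat']
--
-- months = [31,28,31,30,31,30,31,31,30,31,30,31]
--
-- months_leap_year = [31,29,31,30,31,30,31,31,30,31,30,31]
--
-- def create_calendar_year(year, first_weekday):
--     s = days.index(first_weekday)
--     leap = year % 400 == 0 or (year % 4 == 0 and year % 100 != 0)
--     lengths = months_leap_year if leap else months
--     result = []
--     offset = 0
--     for n in lengths:
--         result.append([days[(s + offset + j) % 7] for j in range(n)])
--         offset += n
--     return result
-- ===== Notes on version B (the rewrite author's own statement) =====
-- stated objective: simpler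
-- what changed: B drops A's 365/366-entry full-year weekday list and preallocated 12-slot structure, building each month directly in one pass from a running offset advanced by the actual month length; this also fixes A's leap-year bug where the offset advances by the non-leap lengths.
-- intended difference: On leap years (with a valid weekday name) A advances its month offset by the non-leap month lengths, so every month from March onward starts one weekday too early (repeating Feb 29's weekday); B advances by the actual lengths and returns the intended calendar. — e.g. on create_calendar_year(4, "sun"): A returns [["sun", "mon", "tue", "wed", "thu", "fri", "sat", "sun", "mon", "tue", "wed", "thu", "fri", "sat", "sun", "mon", "tue"…, B returns [["sun", "mon", "tue", "wed", "thu", "fri", "sat", "sun", "mon", "tue", "wed", "thu", "fri", "sat", "sun", "mon", "tue"…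
import Mathlib
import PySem

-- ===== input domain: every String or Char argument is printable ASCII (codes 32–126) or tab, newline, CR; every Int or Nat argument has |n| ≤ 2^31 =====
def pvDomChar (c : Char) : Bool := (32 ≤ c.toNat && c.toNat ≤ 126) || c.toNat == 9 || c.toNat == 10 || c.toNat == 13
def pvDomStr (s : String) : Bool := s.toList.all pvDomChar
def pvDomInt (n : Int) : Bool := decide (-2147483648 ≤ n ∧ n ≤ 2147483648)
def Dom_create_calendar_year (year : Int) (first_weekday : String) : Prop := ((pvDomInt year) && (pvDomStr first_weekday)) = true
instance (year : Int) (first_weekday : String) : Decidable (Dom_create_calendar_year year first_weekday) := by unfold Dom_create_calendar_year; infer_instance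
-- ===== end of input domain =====

-- ===== PORT A =====
-- B builds each month directly with a running offset advanced by the ACTUAL month length,
-- fixing A's leap-year offset bug (A advances `counter` by the non-leap lengths); return-value equivalence only.
def pvDays : List String := ["sun","mon","tue","wed","thu","fri","sat"]
def pvMonths : List Int := [31,28,31,30,31,30,31,31,30,31,30,31]
def pvMonthsLeap : List Int := [31,29,31,30,31,30,31,31,30,31,30,31]

def is_leap_year (year : Int) : Bool :=
  if PySem.Int.mod year 100 == 0 && PySem.Int.mod year 400 != 0 then false
  else if PySem.Int.mod year 100 == 0 && PySem.Int.mod year 400 == 0 then true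
  else if PySem.Int.mod year 4 == 0 then true
  else false

-- literal transliteration of A; `none` from days.index = ValueError, excluded by Pre_
def create_calendar_year (year : Int) (first_weekday : String) : List (List String) :=
  match PySem.List.index? pvDays first_weekday with
  | none => []
  | some sN =>
    let start_index : Int := sN
    if is_leap_year year then
      let weekday_list := (PySem.List.pyRange 0 366 1).foldl
        (fun acc i => acc ++ [PySem.List.pyGetD pvDays (PySem.Int.mod (start_index + i) 7) ""]) []
      let st := (PySem.List.pyRange 0 12 1).foldl
        (fun (st : List (List String) × Int) i =>
          let mi := PySem.List.pyGetD pvMonthsLeap i 0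
          let month := (PySem.List.pyRange 0 mi 1).foldl
            (fun m j => m ++ [PySem.List.pyGetD weekday_list (st.2 + j) ""])
            (PySem.List.pyGetD st.1 i [])
          (st.1.set i.toNat month, st.2 + PySem.List.pyGetD pvMonths i 0))
        ([[],[],[],[],[],[],[],[],[],[],[],[]], 0)
      st.1
    else
      let weekday_list := (PySem.List.pyRange 0 365 1).foldl
        (fun acc i => acc ++ [PySem.List.pyGetD pvDays (PySem.Int.mod (start_index + i) 7) ""]) []
      let st := (PySem.List.pyRange 0 12 1).foldl
        (fun (st : List (List String) × Int) i =>
          let mi := PySem.List.pyGetD pvMonths i 0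
          let month := (PySem.List.pyRange 0 mi 1).foldl
            (fun m j => m ++ [PySem.List.pyGetD weekday_list (st.2 + j) ""])
            (PySem.List.pyGetD st.1 i [])
          (st.1.set i.toNat month, st.2 + PySem.List.pyGetD pvMonths i 0))
        ([[],[],[],[],[],[],[],[],[],[],[],[]], 0)
      st.1

-- ===== PORT B =====
def create_calendar_year_alt (year : Int) (first_weekday : String) : List (List String) :=
  match PySem.List.index? pvDays first_weekday with
  | none => []
  | some sN =>
    let s : Int := sN
    let leap := PySem.Int.mod year 400 == 0 ||
                (PySem.Int.mod year 4 == 0 && PySem.Int.mod year 100 != 0)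
    let lengths := if leap then pvMonthsLeap else pvMonths
    (lengths.foldl (fun (st : List (List String) × Int) n =>
        (st.1 ++ [(PySem.List.pyRange 0 n 1).map
          (fun j => PySem.List.pyGetD pvDays (PySem.Int.mod (s + st.2 + j) 7) "")],
         st.2 + n))
      ([], 0)).1

-- ===== PRECONDITION & SPEC =====
-- Pre_ excludes first_weekday not among the seven day names, on which A's days.index raises ValueError.
def Pre_create_calendar_year (year : Int) (first_weekday : String) : Prop :=
  first_weekday = "sun" ∨ first_weekday = "mon" ∨ first_weekday = "tue" ∨ first_weekday = "wed" ∨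
  first_weekday = "thu" ∨ first_weekday = "fri" ∨ first_weekday = "sat"
instance (year : Int) (first_weekday : String) : Decidable (Pre_create_calendar_year year first_weekday) := by
  unfold Pre_create_calendar_year; infer_instance

def pvWitness_create_calendar_year : Int × String := (2019, "mon")

-- In leap years A advances its month offset by the NON-leap month lengths, so every month from March on
-- starts one weekday early (repeating Feb 29's weekday); B uses the actual lengths, the intended calendar.
def D_create_calendar_year (year : Int) (first_weekday : String) : Prop :=
  (first_weekday = "sun" ∨ first_weekday = "mon" ∨ first_weekday = "tue" ∨ first_weekday = "wed" ∨
   first_weekday = "thu" ∨ first_weekday = "fri" ∨ first_weekday = "sat") ∧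
  ((400 : Int) ∣ year ∨ ((4 : Int) ∣ year ∧ ¬ (100 : Int) ∣ year))
instance (year : Int) (first_weekday : String) : Decidable (D_create_calendar_year year first_weekday) := by
  unfold D_create_calendar_year; infer_instance

def Spec_create_calendar_year (year : Int) (first_weekday : String) (out : List (List String)) : Prop :=
  ¬ D_create_calendar_year year first_weekday → out = create_calendar_year_alt year first_weekday
instance (year : Int) (first_weekday : String) (out : List (List String)) : Decidable (Spec_create_calendar_year year first_weekday out) := by
  unfold Spec_create_calendar_year; infer_instance

def pvDiffWitness_create_calendar_year : Int × String := (4, "sun")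

def pvDiffWitnessOut_create_calendar_year : (List (List String)) × (List (List String)) :=
  ([["sun", "mon", "tue", "wed", "thu", "fri", "sat", "sun", "mon", "tue", "wed", "thu", "fri", "sat", "sun", "mon", "tue", "wed", "thu", "fri", "sat", "sun", "mon", "tue", "wed", "thu", "fri", "sat", "sun", "mon", "tue"],
  ["wed", "thu", "fri", "sat", "sun", "mon", "tue", "wed", "thu", "fri", "sat", "sun", "mon", "tue", "wed", "thu", "fri", "sat", "sun", "mon", "tue", "wed", "thu", "fri", "sat", "sun", "mon", "tue", "wed"],
  ["wed", "thu", "fri", "sat", "sun", "mon", "tue", "wed", "thu", "fri", "sat", "sun", "mon", "tue", "wed", "thu", "fri", "sat", "sun", "mon", "tue", "wed", "thu", "fri", "sat", "sun", "mon", "tue", "wed", "thu", "fri"],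
  ["sat", "sun", "mon", "tue", "wed", "thu", "fri", "sat", "sun", "mon", "tue", "wed", "thu", "fri", "sat", "sun", "mon", "tue", "wed", "thu", "fri", "sat", "sun", "mon", "tue", "wed", "thu", "fri", "sat", "sun"],
  ["mon", "tue", "wed", "thu", "fri", "sat", "sun", "mon", "tue", "wed", "thu", "fri", "sat", "sun", "mon", "tue", "wed", "thu", "fri", "sat", "sun", "mon", "tue", "wed", "thu", "fri", "sat", "sun", "mon", "tue", "wed"],
  ["thu", "fri", "sat", "sun", "mon", "tue", "wed", "thu", "fri", "sat", "sun", "mon", "tue", "wed", "thu", "fri", "sat", "sun", "mon", "tue", "wed", "thu", "fri", "sat", "sun", "mon", "tue", "wed", "thu", "fri"],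
  ["sat", "sun", "mon", "tue", "wed", "thu", "fri", "sat", "sun", "mon", "tue", "wed", "thu", "fri", "sat", "sun", "mon", "tue", "wed", "thu", "fri", "sat", "sun", "mon", "tue", "wed", "thu", "fri", "sat", "sun", "mon"],
  ["tue", "wed", "thu", "fri", "sat", "sun", "mon", "tue", "wed", "thu", "fri", "sat", "sun", "mon", "tue", "wed", "thu", "fri", "sat", "sun", "mon", "tue", "wed", "thu", "fri", "sat", "sun", "mon", "tue", "wed", "thu"],
  ["fri", "sat", "sun", "mon", "tue", "wed", "thu", "fri", "sat", "sun", "mon", "tue", "wed", "thu", "fri", "sat", "sun", "mon", "tue", "wed", "thu", "fri", "sat", "sun", "mon", "tue", "wed", "thu", "fri", "sat"],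
  ["sun", "mon", "tue", "wed", "thu", "fri", "sat", "sun", "mon", "tue", "wed", "thu", "fri", "sat", "sun", "mon", "tue", "wed", "thu", "fri", "sat", "sun", "mon", "tue", "wed", "thu", "fri", "sat", "sun", "mon", "tue"],
  ["wed", "thu", "fri", "sat", "sun", "mon", "tue", "wed", "thu", "fri", "sat", "sun", "mon", "tue", "wed", "thu", "fri", "sat", "sun", "mon", "tue", "wed", "thu", "fri", "sat", "sun", "mon", "tue", "wed", "thu"],
  ["fri", "sat", "sun", "mon", "tue", "wed", "thu", "fri", "sat", "sun", "mon", "tue", "wed", "thu", "fri", "sat", "sun", "mon", "tue", "wed", "thu", "fri", "sat", "sun", "mon", "tue", "wed", "thu", "fri", "sat", "sun"]],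
  [["sun", "mon", "tue", "wed", "thu", "fri", "sat", "sun", "mon", "tue", "wed", "thu", "fri", "sat", "sun", "mon", "tue", "wed", "thu", "fri", "sat", "sun", "mon", "tue", "wed", "thu", "fri", "sat", "sun", "mon", "tue"],
  ["wed", "thu", "fri", "sat", "sun", "mon", "tue", "wed", "thu", "fri", "sat", "sun", "mon", "tue", "wed", "thu", "fri", "sat", "sun", "mon", "tue", "wed", "thu", "fri", "sat", "sun", "mon", "tue", "wed"],
  ["thu", "fri", "sat", "sun", "mon", "tue", "wed", "thu", "fri", "sat", "sun", "mon", "tue", "wed", "thu", "fri", "sat", "sun", "mon", "tue", "wed", "thu", "fri", "sat", "sun", "mon", "tue", "wed", "thu", "fri", "sat"],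
  ["sun", "mon", "tue", "wed", "thu", "fri", "sat", "sun", "mon", "tue", "wed", "thu", "fri", "sat", "sun", "mon", "tue", "wed", "thu", "fri", "sat", "sun", "mon", "tue", "wed", "thu", "fri", "sat", "sun", "mon"],
  ["tue", "wed", "thu", "fri", "sat", "sun", "mon", "tue", "wed", "thu", "fri", "sat", "sun", "mon", "tue", "wed", "thu", "fri", "sat", "sun", "mon", "tue", "wed", "thu", "fri", "sat", "sun", "mon", "tue", "wed", "thu"],
  ["fri", "sat", "sun", "mon", "tue", "wed", "thu", "fri", "sat", "sun", "mon", "tue", "wed", "thu", "fri", "sat", "sun", "mon", "tue", "wed", "thu", "fri", "sat", "sun", "mon", "tue", "wed", "thu", "fri", "sat"],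
  ["sun", "mon", "tue", "wed", "thu", "fri", "sat", "sun", "mon", "tue", "wed", "thu", "fri", "sat", "sun", "mon", "tue", "wed", "thu", "fri", "sat", "sun", "mon", "tue", "wed", "thu", "fri", "sat", "sun", "mon", "tue"],
  ["wed", "thu", "fri", "sat", "sun", "mon", "tue", "wed", "thu", "fri", "sat", "sun", "mon", "tue", "wed", "thu", "fri", "sat", "sun", "mon", "tue", "wed", "thu", "fri", "sat", "sun", "mon", "tue", "wed", "thu", "fri"],
  ["sat", "sun", "mon", "tue", "wed", "thu", "fri", "sat", "sun", "mon", "tue", "wed", "thu", "fri", "sat", "sun", "mon", "tue", "wed", "thu", "fri", "sat", "sun", "mon", "tue", "wed", "thu", "fri", "sat", "sun"],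
  ["mon", "tue", "wed", "thu", "fri", "sat", "sun", "mon", "tue", "wed", "thu", "fri", "sat", "sun", "mon", "tue", "wed", "thu", "fri", "sat", "sun", "mon", "tue", "wed", "thu", "fri", "sat", "sun", "mon", "tue", "wed"],
  ["thu", "fri", "sat", "sun", "mon", "tue", "wed", "thu", "fri", "sat", "sun", "mon", "tue", "wed", "thu", "fri", "sat", "sun", "mon", "tue", "wed", "thu", "fri", "sat", "sun", "mon", "tue", "wed", "thu", "fri"],
  ["sat", "sun", "mon", "tue", "wed", "thu", "fri", "sat", "sun", "mon", "tue", "wed", "thu", "fri", "sat", "sun", "mon", "tue", "wed", "thu", "fri", "sat", "sun", "mon", "tue", "wed", "thu", "fri", "sat", "sun", "mon"]])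

-- ===== CLAIM (what is proved, stated in full; the proofs are below) =====
def Claim_unchanged_create_calendar_year : Prop := ∀ (year : Int) (first_weekday : String), Dom_create_calendar_year year first_weekday → Pre_create_calendar_year year first_weekday → Spec_create_calendar_year year first_weekday (create_calendar_year year first_weekday)
def Claim_changed_create_calendar_year : Prop := Dom_create_calendar_year (pvDiffWitness_create_calendar_year.1) (pvDiffWitness_create_calendar_year.2) ∧ Pre_create_calendar_year (pvDiffWitness_create_calendar_year.1) (pvDiffWitness_create_calendar_year.2) ∧ D_create_calendar_year (pvDiffWitness_create_calendar_year.1) (pvDiffWitness_create_calendar_year.2) ∧ create_calendar_year (pvDiffWitness_create_calendar_year.1) (pvDiffWitness_create_calendar_year.2) = pvDiffWitnessOut_create_calendar_year.1 ∧ create_calendar_year_alt (pvDiffWitness_create_calendar_year.1) (pvDiffWitness_create_calendar_year.2) = pvDiffWitnessOut_create_calendar_year.2 ∧ pvDiffWitnessOut_create_calendar_year.1 ≠ pvDiffWitnessOut_create_calendar_year.2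
def Claim_exact_create_calendar_year : Prop := ∀ (year : Int) (first_weekday : String), Dom_create_calendar_year year first_weekday → Pre_create_calendar_year year first_weekday → D_create_calendar_year year first_weekday → create_calendar_year year first_weekday ≠ create_calendar_year_alt year first_weekday

-- ===== LEMMAS AND PROOFS =====

lemma leap_eq (y : Int) :
    (PySem.Int.mod y 400 == 0 || (PySem.Int.mod y 4 == 0 && PySem.Int.mod y 100 != 0)) = is_leap_year y := by
  simp only [is_leap_year,
    PySem.Int.mod_eq_emod_of_pos (a := y) (by norm_num : (0:Int) < 100),
    PySem.Int.mod_eq_emod_of_pos (a := y) (by norm_num : (0:Int) < 400),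
    PySem.Int.mod_eq_emod_of_pos (a := y) (by norm_num : (0:Int) < 4)]
  by_cases h4 : y % 4 = 0 <;> by_cases h100 : y % 100 = 0 <;> by_cases h400 : y % 400 = 0 <;>
    simp [h4, h100, h400] <;> omega

-- ===== VERDICT (by name: the statement is the Claim_ definition above) =====
set_option maxRecDepth 40000 in
set_option maxHeartbeats 4000000 in
theorem create_calendar_year_spec : Claim_unchanged_create_calendar_year := by
  intro y fw _ hpre hnD
  have hb : (PySem.Int.mod y 400 == 0 || (PySem.Int.mod y 4 == 0 && PySem.Int.mod y 100 != 0)) = false := by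
    rw [Bool.eq_false_iff]
    intro h
    simp only [Bool.or_eq_true, Bool.and_eq_true, beq_iff_eq, bne_iff_ne, ne_eq,
      PySem.Int.mod_eq_zero_iff_dvd] at h
    exact hnD ⟨hpre, h⟩
  have hleap : is_leap_year y = false := (leap_eq y) ▸ hb
  rcases hpre with rfl | rfl | rfl | rfl | rfl | rfl | rfl <;>
    · simp only [create_calendar_year, create_calendar_year_alt, hleap, hb]
      decide

set_option maxRecDepth 10000 in
theorem create_calendar_year_changed : Claim_changed_create_calendar_year := by
  unfold Claim_changed_create_calendar_year; decide

set_option maxRecDepth 40000 in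
set_option maxHeartbeats 4000000 in
theorem create_calendar_year_tight : Claim_exact_create_calendar_year := by
  intro y fw _ hpre hD
  have hb : (PySem.Int.mod y 400 == 0 || (PySem.Int.mod y 4 == 0 && PySem.Int.mod y 100 != 0)) = true := by
    simp only [Bool.or_eq_true, Bool.and_eq_true, beq_iff_eq, bne_iff_ne, ne_eq,
      PySem.Int.mod_eq_zero_iff_dvd]
    exact hD.2
  have hleap : is_leap_year y = true := (leap_eq y) ▸ hb
  rcases hpre with rfl | rfl | rfl | rfl | rfl | rfl | rfl <;>
    · simp only [create_calendar_year, create_calendar_year_alt, hleap, hb]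
      decide
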